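-- pv_equiv track=rewrite | github.com/AjaniStewart/hw-12700 | 08/ladybugs.py | ladyBug
-- ===== SOURCE A (Python) =====
-- def ladyBug(s):
--     """
--     it cannot be solved if:
--     there is only one occurence of a letter
--     if there are no spaces in the board and they arnt already happy
--     """
--     l = [] #l has all the unique letters in the string
--     for i in s:
--         if i not in l:
--             l.append(i)
--
--     for i in l:
--         if s.count(i) == 1 and i != '_' : #if there is only one occurence of a letter
--             return 'NO'
--
--         #if there are no spaces, and they arnt already happy
--         #if the next and previous element are different, then it isnt happy
--     if '_' not in l:
--         for i in range(1,len(s)-1):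
--             if s[i] != s[i+1] and s[i] != s[i-1]:
--                 return 'NO'
--     return 'YES' #all other cases it can be solved
-- ===== SOURCE B (Python) =====
-- def ladyBug(s):
--     counts = {}
--     for c in s:
--         counts[c] = counts.get(c, 0) + 1
--     if any(c != '_' and n == 1 for c, n in counts.items()):
--         return 'NO'
--     if '_' in counts:
--         return 'YES'
--     runs = []
--     for c in s:
--         if runs and runs[-1][0] == c:
--             runs[-1] = (c, runs[-1][1] + 1)
--         else:
--             runs.append((c, 1))
--     if any(n == 1 for _, n in runs[1:-1]):
--         return 'NO'
--     return 'YES'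
-- ===== Notes on version B (the rewrite author's own statement) =====
-- stated objective: idiomatic
-- what changed: B builds a frequency dict in one pass instead of A's repeated s.count scans over the unique-letter list, and replaces A's per-index neighbour comparison loop by a run-length decomposition that flags any interior maximal run of length 1.
import Mathlib
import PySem

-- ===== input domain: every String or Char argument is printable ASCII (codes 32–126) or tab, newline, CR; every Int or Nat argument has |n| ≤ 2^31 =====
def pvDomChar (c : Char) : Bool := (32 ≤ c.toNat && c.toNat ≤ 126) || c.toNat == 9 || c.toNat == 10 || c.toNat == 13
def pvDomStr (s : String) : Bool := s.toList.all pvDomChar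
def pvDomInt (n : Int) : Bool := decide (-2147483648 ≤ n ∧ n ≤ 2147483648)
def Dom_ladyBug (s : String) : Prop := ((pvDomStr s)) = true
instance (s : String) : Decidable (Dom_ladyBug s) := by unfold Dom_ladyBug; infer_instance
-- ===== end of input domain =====

-- B replaces A's repeated s.count scans by one frequency dict and A's per-index
-- neighbour loop by a run-length decomposition (objective: alternative/idiomatic).

-- ===== PORT A =====
-- literal port of A: unique-letter list, s.count per letter (a 1-char needle, so
-- str.count = the character count, exact), then the interior-index neighbour loop
def ladyBug (s : String) : String :=
  let cs := s.toList
  let l := cs.foldl (fun acc i => if acc.contains i then acc else acc ++ [i]) []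
  if l.any (fun i => PySem.List.count cs i == 1 && i != '_') then "NO"
  else if !(l.contains '_') &&
      (PySem.List.pyRange 1 ((cs.length : Int) - 1) 1).any (fun i =>
        (PySem.List.pyGet? cs i != PySem.List.pyGet? cs (i + 1)) &&
        (PySem.List.pyGet? cs i != PySem.List.pyGet? cs (i - 1)))
  then "NO" else "YES"

-- ===== PORT B =====
-- Source B's run-building loop body ("if runs and runs[-1][0] == c: … else: runs.append((c,1))")
def stepRun (rs : List (Char × Int)) (c : Char) : List (Char × Int) :=
  match rs.getLast? with
  | some (c', n) => if c' == c then rs.dropLast ++ [(c, n + 1)] else rs ++ [(c, 1)]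
  | none => [(c, 1)]

-- literal port of Source B: counter dict, '_' membership, maximal runs, interior runs[1:-1]
def ladyBug_alt (s : String) : String :=
  let cs := s.toList
  let counts := cs.foldl (fun d c => d.insert c (d.getD c 0 + 1)) (PySem.Dict.empty : PySem.Dict Char Int)
  if counts.items.any (fun p => p.1 != '_' && p.2 == 1) then "NO"
  else if counts.contains '_' then "YES"
  else
    let runs : List (Char × Int) := cs.foldl stepRun []
    if (PySem.List.slice runs (some 1) (some (-1))).any (fun p => p.2 == 1) then "NO"
    else "YES"

-- ===== PRECONDITION & SPEC =====
def Spec_ladyBug (s : String) (out : String) : Prop := out = ladyBug_alt s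
instance (s : String) (out : String) : Decidable (Spec_ladyBug s out) := by unfold Spec_ladyBug; infer_instance

-- ===== CLAIM (what is proved, stated in full; the proofs are below) =====
def Claim_equal_ladyBug : Prop := ∀ (s : String), Dom_ladyBug s → Spec_ladyBug s (ladyBug s)

-- ===== LEMMAS AND PROOFS =====

def mergeRun (c : Char) (n : Int) : List Char → List (Char × Int)
  | [] => [(c, n)]
  | a :: t => if a = c then mergeRun c (n + 1) t else (c, n) :: mergeRun a 1 t

def runsF : List Char → List (Char × Int)
  | [] => []
  | a :: t => mergeRun a 1 t

lemma foldl_step_eq (cs : List Char) : ∀ (pre : List (Char × Int)) (c : Char) (n : Int),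
    cs.foldl stepRun (pre ++ [(c, n)]) = pre ++ mergeRun c n cs := by
  induction cs with
  | nil => intro pre c n; simp [mergeRun]
  | cons a t ih =>
    intro pre c n
    simp only [List.foldl_cons, stepRun, List.getLast?_concat, List.dropLast_concat]
    by_cases h : c = a
    · subst h
      simp only [beq_self_eq_true, if_pos]
      rw [ih]
      simp [mergeRun]
    · have hba : (c == a) = false := by simp [h]
      simp only [hba, Bool.false_eq_true, if_neg, not_false_eq_true]
      rw [show pre ++ [(c,n)] ++ [(a,(1:Int))] = (pre ++ [(c,n)]) ++ [(a,(1:Int))] from by simp]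
      rw [ih (pre ++ [(c,n)]) a 1]
      have hm : mergeRun c n (a :: t) = (c, n) :: mergeRun a 1 t := by
        simp only [mergeRun]; rw [if_neg (fun h' => h h'.symm)]
      rw [hm]; simp

lemma runs_eq (cs : List Char) :
    cs.foldl stepRun ([] : List (Char × Int)) = runsF cs := by
  cases cs with
  | nil => rfl
  | cons a t =>
    show List.foldl _ ([] ++ [(a, (1:Int))]) t = _
    rw [foldl_step_eq t [] a 1]
    rfl

lemma mergeRun_ne_nil (cs : List Char) : ∀ (c : Char) (n : Int), mergeRun c n cs ≠ [] := by
  induction cs with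
  | nil => intro c n; simp [mergeRun]
  | cons a t ih =>
    intro c n
    by_cases h : a = c
    · simpa [mergeRun, h] using ih c (n + 1)
    · simp [mergeRun, h]

lemma mergeRun_head (cs : List Char) : ∀ (c : Char) (n : Int),
    ∃ m t, mergeRun c n cs = (c, m) :: t := by
  induction cs with
  | nil => intro c n; exact ⟨n, [], rfl⟩
  | cons a t ih =>
    intro c n
    by_cases h : a = c
    · simpa [mergeRun, h] using ih c (n + 1)
    · exact ⟨n, mergeRun a 1 t, by simp [mergeRun, h]⟩

lemma mergeRun_pos (cs : List Char) : ∀ (c : Char) (n : Int), 1 ≤ n →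
    ∀ p ∈ mergeRun c n cs, 1 ≤ p.2 := by
  induction cs with
  | nil => intro c n hn p hp; simp [mergeRun] at hp; subst hp; exact hn
  | cons a t ih =>
    intro c n hn p hp
    by_cases h : a = c
    · simp only [mergeRun, if_pos h] at hp
      exact ih c (n + 1) (by omega) p hp
    · simp only [mergeRun, if_neg h, List.mem_cons] at hp
      rcases hp with rfl | hp
      · exact hn
      · exact ih a 1 le_rfl p hp

lemma mergeRun_chain (cs : List Char) : ∀ (c : Char) (n : Int),
    List.IsChain (fun a b : Char × Int => a.1 ≠ b.1) (mergeRun c n cs) := by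
  induction cs with
  | nil => intro c n; simp [mergeRun]
  | cons a t ih =>
    intro c n
    by_cases h : a = c
    · simpa [mergeRun, h] using ih c (n + 1)
    · simp only [mergeRun, if_neg h]
      obtain ⟨m, tt, he⟩ := mergeRun_head t a 1
      rw [he]
      exact List.isChain_cons_cons.mpr ⟨fun h' => h h'.symm, he ▸ ih a 1⟩

def flattenRuns (rs : List (Char × Int)) : List Char :=
  rs.flatMap (fun p => List.replicate p.2.toNat p.1)

lemma mergeRun_flatten (cs : List Char) : ∀ (c : Char) (n : Int), 1 ≤ n →
    flattenRuns (mergeRun c n cs) = List.replicate n.toNat c ++ cs := by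
  induction cs with
  | nil => intro c n hn; simp [mergeRun, flattenRuns]
  | cons a t ih =>
    intro c n hn
    by_cases h : a = c
    · rw [show mergeRun c n (a :: t) = mergeRun c (n+1) t from by simp [mergeRun, h]]
      rw [ih c (n + 1) (by omega)]
      have : (n + 1).toNat = n.toNat + 1 := by omega
      rw [this, List.replicate_succ']
      simp [h]
    · rw [show mergeRun c n (a :: t) = (c, n) :: mergeRun a 1 t from by simp [mergeRun, h]]
      rw [flattenRuns, List.flatMap_cons, ← flattenRuns, ih a 1 le_rfl]
      simp

lemma runsF_flatten (cs : List Char) : flattenRuns (runsF cs) = cs := by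
  cases cs with
  | nil => rfl
  | cons a t => rw [runsF, mergeRun_flatten t a 1 le_rfl]; simp

lemma mergeRun_split (l2 : List Char) : ∀ (l1 : List Char) (c : Char) (n : Int) (z : Char),
    l1.getLastD c ≠ z →
    mergeRun c n (l1 ++ z :: l2) = mergeRun c n l1 ++ mergeRun z 1 l2 := by
  intro l1
  induction l1 with
  | nil =>
    intro c n z h
    simp only [List.getLastD_nil] at h
    simp only [List.nil_append, mergeRun]
    rw [if_neg (fun h' : z = c => h h'.symm)]
    simp
  | cons a t ih =>
    intro c n z h
    rw [List.getLastD_cons] at h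
    by_cases hac : a = c
    · rw [show (a :: t) ++ z :: l2 = a :: (t ++ z :: l2) from rfl]
      rw [show mergeRun c n (a :: (t ++ z :: l2)) = mergeRun c (n+1) (t ++ z :: l2) from by simp [mergeRun, hac]]
      rw [ih c (n + 1) z (by rwa [hac] at h)]
      simp [mergeRun, hac]
    · rw [show (a :: t) ++ z :: l2 = a :: (t ++ z :: l2) from rfl]
      rw [show mergeRun c n (a :: (t ++ z :: l2)) = (c, n) :: mergeRun a 1 (t ++ z :: l2) from by simp [mergeRun, hac]]
      rw [ih a 1 z h]
      simp [mergeRun, hac]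

lemma mem_tail_dropLast {α : Type} {p : α} {rs : List α} (h : p ∈ rs.tail.dropLast) :
    ∃ r1 r2, rs = r1 ++ p :: r2 ∧ r1 ≠ [] ∧ r2 ≠ [] := by
  cases rs with
  | nil => simp at h
  | cons a t =>
    simp only [List.tail_cons] at h
    have ht : t ≠ [] := by rintro rfl; simp at h
    obtain ⟨l1, l2, he⟩ := List.append_of_mem h
    refine ⟨a :: l1, l2 ++ [t.getLast ht], ?_, by simp, by simp⟩
    have := List.dropLast_concat_getLast ht
    calc (a :: t : List α) = a :: (t.dropLast ++ [t.getLast ht]) := by rw [this]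
    _ = (a :: l1) ++ p :: (l2 ++ [t.getLast ht]) := by rw [he]; simp

lemma mem_tail_dropLast_of {α : Type} (p : α) (r1 r2 : List α) (h1 : r1 ≠ []) (h2 : r2 ≠ []) :
    p ∈ (r1 ++ p :: r2).tail.dropLast := by
  obtain ⟨a, r1', rfl⟩ := List.exists_cons_of_ne_nil h1
  simp only [List.cons_append, List.tail_cons]
  rw [show r1' ++ p :: r2 = (r1' ++ [p]) ++ r2 from by simp]
  rw [List.dropLast_append_of_ne_nil h2]
  simp

def Pat (cs : List Char) : Prop :=
  ∃ pre x y z post, cs = pre ++ x :: y :: z :: post ∧ y ≠ x ∧ y ≠ z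

lemma triple_decomp (cs : List Char) (j : Nat) (h1 : 1 ≤ j) (h2 : j + 1 < cs.length) :
    cs = cs.take (j-1) ++ (cs[j-1]'(by omega)) :: (cs[j]'(by omega)) :: (cs[j+1]'(by omega)) :: cs.drop (j+2) := by
  conv_lhs => rw [← List.take_append_drop (j-1) cs]
  congr 1
  rw [List.drop_eq_getElem_cons (show j - 1 < cs.length by omega)]
  congr 1
  rw [show j - 1 + 1 = j from by omega]
  rw [List.drop_eq_getElem_cons (show j < cs.length by omega)]
  congr 1
  rw [List.drop_eq_getElem_cons (show j + 1 < cs.length by omega)]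

lemma idx_iff_pat (cs : List Char) :
    ((PySem.List.pyRange 1 ((cs.length : Int) - 1) 1).any (fun i =>
        (PySem.List.pyGet? cs i != PySem.List.pyGet? cs (i + 1)) &&
        (PySem.List.pyGet? cs i != PySem.List.pyGet? cs (i - 1))) = true) ↔ Pat cs := by
  rw [List.any_eq_true]
  constructor
  · rintro ⟨i, hi, hf⟩
    rw [PySem.List.mem_pyRange_one] at hi
    obtain ⟨j, rfl⟩ : ∃ j : Nat, i = (j : Int) := ⟨i.toNat, by omega⟩
    have hj1 : 1 ≤ j := by omega
    have hj2 : j + 1 < cs.length := by omega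
    rw [show (j : Int) + 1 = ((j + 1 : Nat) : Int) from by push_cast; ring] at hf
    rw [show (j : Int) - 1 = ((j - 1 : Nat) : Int) from by omega] at hf
    simp only [PySem.List.pyGet?_natCast] at hf
    rw [List.getElem?_eq_getElem (show j < cs.length by omega),
        List.getElem?_eq_getElem (show j + 1 < cs.length by omega),
        List.getElem?_eq_getElem (show j - 1 < cs.length by omega)] at hf
    simp only [bne_iff_ne, ne_eq, Option.some.injEq, Bool.and_eq_true] at hf
    exact ⟨cs.take (j-1), cs[j-1], cs[j], cs[j+1], cs.drop (j+2),
      triple_decomp cs j hj1 hj2, hf.2, hf.1⟩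
  · rintro ⟨pre, x, y, z, post, rfl, hyx, hyz⟩
    refine ⟨((pre.length + 1 : Nat) : Int), ?_, ?_⟩
    · rw [PySem.List.mem_pyRange_one]
      simp only [List.length_append, List.length_cons]
      constructor <;> [omega; (push_cast; omega)]
    · rw [show ((pre.length + 1 : Nat) : Int) + 1 = ((pre.length + 2 : Nat) : Int) from by push_cast; ring]
      rw [show ((pre.length + 1 : Nat) : Int) - 1 = ((pre.length : Nat) : Int) from by push_cast; ring]
      simp only [PySem.List.pyGet?_natCast]
      rw [show pre.length + 1 = pre.length + 1 from rfl]
      rw [List.getElem?_append_right (by omega), List.getElem?_append_right (by omega),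
          List.getElem?_append_right (by omega)]
      simp [bne_iff_ne, hyx, hyz]

lemma runsF_chain (cs : List Char) :
    List.IsChain (fun a b : Char × Int => a.1 ≠ b.1) (runsF cs) := by
  cases cs with
  | nil => simp [runsF]
  | cons a t => exact mergeRun_chain t a 1

lemma runsF_pos (cs : List Char) : ∀ p ∈ runsF cs, 1 ≤ p.2 := by
  cases cs with
  | nil => simp [runsF]
  | cons a t => exact mergeRun_pos t a 1 le_rfl

lemma run_iff_pat (cs : List Char) :
    (((runsF cs).tail.dropLast).any (fun p => p.2 == 1) = true) ↔ Pat cs := by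
  rw [List.any_eq_true]
  constructor
  · rintro ⟨p, hp, hp1⟩
    rw [beq_iff_eq] at hp1
    obtain ⟨r1, r2, he, h1n, h2n⟩ := mem_tail_dropLast hp
    have hch : List.IsChain (fun a b : Char × Int => a.1 ≠ b.1) (r1 ++ p :: r2) :=
      he ▸ runsF_chain cs
    have hpos : ∀ q ∈ r1 ++ p :: r2, 1 ≤ q.2 := fun q hq => runsF_pos cs q (he ▸ hq)
    have hflat : flattenRuns (r1 ++ p :: r2) = cs := by rw [← he]; exact runsF_flatten cs
    rw [List.isChain_append] at hch
    obtain ⟨hc1, hc2, hlast⟩ := hch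
    obtain ⟨q, r2', rfl⟩ := List.exists_cons_of_ne_nil h2n
    have hpq : p.1 ≠ q.1 := (List.isChain_cons_cons.mp hc2).1
    have hwmem : r1.getLast h1n ∈ r1 := List.getLast_mem h1n
    have hwp : (r1.getLast h1n).1 ≠ p.1 := by
      refine hlast _ ?_ p ?_
      · rw [List.getLast?_eq_some_getLast h1n]; rfl
      · rfl
    have hw2 : 1 ≤ (r1.getLast h1n).2 := hpos _ (by simp [hwmem])
    have hq2 : 1 ≤ q.2 := hpos q (by simp)
    refine ⟨flattenRuns r1.dropLast ++ List.replicate ((r1.getLast h1n).2.toNat - 1) (r1.getLast h1n).1,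
      (r1.getLast h1n).1, p.1, q.1,
      List.replicate (q.2.toNat - 1) q.1 ++ flattenRuns r2', ?_, Ne.symm hwp, hpq⟩
    rw [← hflat]
    conv_lhs => rw [← List.dropLast_concat_getLast h1n]
    simp only [flattenRuns, List.flatMap_append, List.flatMap_cons, List.flatMap_nil]
    rw [hp1]
    rw [show (r1.getLast h1n).2.toNat = ((r1.getLast h1n).2.toNat - 1) + 1 from by omega,
        List.replicate_succ']
    rw [show q.2.toNat = (q.2.toNat - 1) + 1 from by omega, List.replicate_succ]
    simp [List.append_assoc]
  · rintro ⟨pre, x, y, z, post, rfl, hyx, hyz⟩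
    have hu : pre ++ [x] ≠ ([] : List Char) := by simp
    obtain ⟨c0, u', hu'⟩ := List.exists_cons_of_ne_nil hu
    have hL : u'.getLastD c0 = x := by
      have h1 : (pre ++ [x]).getLast? = some x := List.getLast?_concat
      rw [hu', List.getLast?_cons] at h1
      rw [List.getLastD_eq_getLast?]
      exact Option.some.inj h1
    have hsplit : runsF (pre ++ x :: y :: z :: post) =
        mergeRun c0 1 u' ++ (y, 1) :: mergeRun z 1 post := by
      rw [show pre ++ x :: y :: z :: post = c0 :: (u' ++ y :: z :: post) from by
        rw [show pre ++ x :: y :: z :: post = (pre ++ [x]) ++ y :: z :: post from by simp, hu']; rfl]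
      rw [runsF, mergeRun_split (z :: post) u' c0 1 y (by rw [hL]; exact Ne.symm hyx)]
      congr 1
      simp only [mergeRun]
      rw [if_neg (fun h' : z = y => hyz h'.symm)]
    refine ⟨(y, 1), ?_, by simp⟩
    rw [hsplit]
    exact mem_tail_dropLast_of (y, 1) (mergeRun c0 1 u') (mergeRun z 1 post)
      (mergeRun_ne_nil u' c0 1) (mergeRun_ne_nil post z 1)

lemma slice_one_neg_one (rs : List (Char × Int)) :
    PySem.List.slice rs (some 1) (some (-1)) = rs.tail.dropLast := by
  cases rs with
  | nil => simp [PySem.List.slice]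
  | cons a t => simp [PySem.List.slice, List.dropLast_eq_take]

theorem ladyBug_equal (s : String) : ladyBug s = ladyBug_alt s := by
  unfold ladyBug ladyBug_alt
  simp only []
  set cs := s.toList with hcs
  have hset : cs.foldl (fun acc i => if acc.contains i then acc else acc ++ [i]) [] =
      PySem.List.dedup cs := rfl
  have hdict : cs.foldl (fun d c => d.insert c (d.getD c 0 + 1))
      (PySem.Dict.empty : PySem.Dict Char Int) = PySem.Dict.counter cs :=
    PySem.Dict.foldl_insert_getD_add_one_eq_counter cs
  rw [hset, hdict]
  have h1 : ((PySem.List.dedup cs).any (fun i => PySem.List.count cs i == 1 && i != '_')) =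
      ((PySem.Dict.counter cs).items.any (fun p => p.1 != '_' && p.2 == 1)) := by
    rw [PySem.Dict.items_counter, List.any_map]
    simp only [PySem.List.dedup_eq_ofList]
    apply List.any_congr rfl
    intro a
    show (PySem.List.count cs a == 1 && a != '_') = (a != '_' && ((cs.count a : Int) == 1))
    rw [Bool.and_comm]
    congr 1
    rw [PySem.List.count_eq, Bool.eq_iff_iff]
    simp
  have h2 : ((PySem.List.dedup cs).contains '_') = ((PySem.Dict.counter cs).contains '_') := by
    rw [PySem.Dict.contains_counter, Bool.eq_iff_iff]
    simp
  have h3 : ((PySem.List.pyRange 1 ((cs.length : Int) - 1) 1).any (fun i =>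
        (PySem.List.pyGet? cs i != PySem.List.pyGet? cs (i + 1)) &&
        (PySem.List.pyGet? cs i != PySem.List.pyGet? cs (i - 1)))) =
      ((PySem.List.slice (cs.foldl stepRun []) (some 1) (some (-1))).any (fun p => p.2 == 1)) := by
    rw [runs_eq, slice_one_neg_one, Bool.eq_iff_iff, idx_iff_pat, run_iff_pat]
  rw [h1, h2, h3]
  by_cases hb1 : ((PySem.Dict.counter cs).items.any (fun p => p.1 != '_' && p.2 == 1)) = true
  · simp [hb1]
  · simp only [Bool.not_eq_true] at hb1
    rw [hb1]
    simp only [if_neg (by simp : ¬(false = true))]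
    by_cases hb2 : ((PySem.Dict.counter cs).contains '_') = true
    · simp [hb2]
    · simp only [Bool.not_eq_true] at hb2
      rw [hb2]
      simp

-- ===== VERDICT (by name: the statement is the Claim_ definition above) =====
theorem ladyBug_spec : Claim_equal_ladyBug := by
  intro s _
  exact ladyBug_equal s
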